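-- pv_equiv track=rewrite | github.com/noamd1977/siretmatcher | siret_matcher/enrichment/email_finder.py | filter_emails
-- ===== SOURCE A (Python) =====
-- _BLACKLIST_PREFIXES = frozenset({
--     "noreply", "no-reply", "no_reply", "postmaster", "abuse",
--     "webmaster", "mailer-daemon", "root", "hostmaster",
--     "admin", "administrator", "support-technique",
--     "exemple", "example", "test", "demo",
-- })
--
-- _PRIORITY = {
--     "contact": 1,
--     "info": 2,
--     "direction": 3,
--     "accueil": 4,
--     "commercial": 5,
--     "rh": 6,
--     "formation": 6,
-- }
--
-- def filter_emails(emails: list[str], site_domain: str = "") -> list[str]: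
--     """Filtre les emails indésirables et priorise."""
--     filtered = []
--     for email in emails:
--         local = email.split("@")[0].lower()
--         # Filtrer les blacklistés
--         if local in _BLACKLIST_PREFIXES or any(local.startswith(p + ".") for p in _BLACKLIST_PREFIXES):
--             continue
--         # Filtrer les extensions de fichiers (images, etc.)
--         if email.endswith((".png", ".jpg", ".gif", ".svg", ".css", ".js")):
--             continue
--         filtered.append(email)
--
--     # Trier par priorité
--     def _priority(email: str) -> int:
--         local = email.split("@")[0].lower()
--         for prefix, prio in _PRIORITY.items():
--             if local == prefix or local.startswith(prefix + "."):
--                 return prio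
--         return 10  # autres
--
--     filtered.sort(key=_priority)
--     return filtered
-- ===== SOURCE B (Python) =====
-- _BLACKLIST = (
--     "noreply", "no-reply", "no_reply", "postmaster", "abuse",
--     "webmaster", "mailer-daemon", "root", "hostmaster",
--     "admin", "administrator", "support-technique",
--     "exemple", "example", "test", "demo",
-- )
--
-- _PRIORITY_ITEMS = (
--     ("contact", 1), ("info", 2), ("direction", 3), ("accueil", 4),
--     ("commercial", 5), ("rh", 6), ("formation", 6),
-- )
--
-- _FILE_EXTS = (".png", ".jpg", ".gif", ".svg", ".css", ".js")
--
-- _PRIOS = (1, 2, 3, 4, 5, 6, 10)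
--
--
-- def filter_emails(emails, site_domain=""):
--     """Single pass distributing kept emails into priority buckets; no comparison sort."""
--     buckets = {p: [] for p in _PRIOS}
--     for email in emails:
--         local = email.split("@")[0].lower()
--         if any(local == b or local.startswith(b + ".") for b in _BLACKLIST):
--             continue
--         if any(email.endswith(x) for x in _FILE_EXTS):
--             continue
--         prio = next((pr for pre, pr in _PRIORITY_ITEMS
--                      if local == pre or local.startswith(pre + ".")), 10)
--         buckets[prio].append(email)
--     out = []
--     for p in _PRIOS:
--         out += buckets[p]
--     return out
-- ===== Notes on version B (the rewrite author's own statement) =====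
-- stated objective: alternative
-- what changed: Replaces A's two-phase filter-then-stable-sort with a single pass that distributes each kept email into one of seven priority buckets (a dict keyed by the possible priorities 1..6,10) and returns the buckets concatenated in ascending priority order.
import Mathlib
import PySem

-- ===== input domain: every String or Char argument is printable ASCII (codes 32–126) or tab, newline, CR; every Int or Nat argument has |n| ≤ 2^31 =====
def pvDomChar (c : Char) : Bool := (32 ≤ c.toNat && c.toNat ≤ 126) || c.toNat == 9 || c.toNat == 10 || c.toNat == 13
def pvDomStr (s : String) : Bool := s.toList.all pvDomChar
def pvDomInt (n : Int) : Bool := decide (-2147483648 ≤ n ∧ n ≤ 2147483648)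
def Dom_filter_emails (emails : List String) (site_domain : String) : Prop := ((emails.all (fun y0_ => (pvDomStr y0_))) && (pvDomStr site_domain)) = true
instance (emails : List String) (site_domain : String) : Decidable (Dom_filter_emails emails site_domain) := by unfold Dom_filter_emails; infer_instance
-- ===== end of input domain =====

-- B replaces A's filter-then-stable-sort with a single pass distributing each kept email
-- into one of seven priority buckets (a dict keyed by 1..6,10), concatenated in ascending
-- priority order (alternative decomposition; same return value).


-- ===== PORT A =====
-- the frozenset/dict literals of the Python module, as A's source uses them
def pvBlacklist : List String :=
  ["noreply", "no-reply", "no_reply", "postmaster", "abuse",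
   "webmaster", "mailer-daemon", "root", "hostmaster",
   "admin", "administrator", "support-technique",
   "exemple", "example", "test", "demo"]

def pvPriorityItems : List (String × Int) :=
  [("contact", 1), ("info", 2), ("direction", 3), ("accueil", 4),
   ("commercial", 5), ("rh", 6), ("formation", 6)]

def pvExts : List String := [".png", ".jpg", ".gif", ".svg", ".css", ".js"]

-- email.split("@")[0].lower(); split? with the nonempty separator "@" is always some,
-- and Python's split never returns an empty list, so getD/headD defaults are never taken
def pvLocal (email : String) : String :=
  PySem.Str.lower (((PySem.Str.split? email "@").getD []).headD "")

-- A's 'for prefix, prio in _PRIORITY.items(): … return 10' loop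
def pvPrioLoop : List (String × Int) → String → Int
  | [], _ => 10
  | (pre, pr) :: rest, loc =>
      if loc == pre || PySem.Str.startswith loc (pre ++ ".") then pr else pvPrioLoop rest loc

def pvKey (email : String) : Int := pvPrioLoop pvPriorityItems (pvLocal email)

def filter_emails (emails : List String) (site_domain : String) : List String :=
  let filtered := emails.foldl (fun acc email =>
    let loc := pvLocal email
    if pvBlacklist.contains loc || pvBlacklist.any (fun p => PySem.Str.startswith loc (p ++ ".")) then
      acc
    else if pvExts.any (fun ext => PySem.Str.endswith email ext) then
      acc
    else acc ++ [email]) []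
  PySem.List.sorted filtered pvKey false

-- ===== PORT B =====
-- Source B's module tuples
def altBlacklist : List String :=
  ["noreply", "no-reply", "no_reply", "postmaster", "abuse",
   "webmaster", "mailer-daemon", "root", "hostmaster",
   "admin", "administrator", "support-technique",
   "exemple", "example", "test", "demo"]

def altPrioItems : List (String × Int) :=
  [("contact", 1), ("info", 2), ("direction", 3), ("accueil", 4),
   ("commercial", 5), ("rh", 6), ("formation", 6)]

def altExts : List String := [".png", ".jpg", ".gif", ".svg", ".css", ".js"]

def altPrios : List Int := [1, 2, 3, 4, 5, 6, 10]

def filter_emails_alt (emails : List String) (site_domain : String) : List String :=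
  -- buckets = {p: [] for p in _PRIOS}
  let init : PySem.Dict Int (List String) :=
    PySem.Dict.ofList (altPrios.map (fun p => (p, ([] : List String))))
  -- single pass: skip blacklisted / file-extension emails, append the rest to their bucket
  let buckets := emails.foldl (fun d email =>
    let loc := PySem.Str.lower (((PySem.Str.split? email "@").getD []).headD "")
    if altBlacklist.any (fun b => loc == b || PySem.Str.startswith loc (b ++ ".")) then d
    else if altExts.any (fun x => PySem.Str.endswith email x) then d
    else
      let prio := ((altPrioItems.find? (fun t =>
        loc == t.1 || PySem.Str.startswith loc (t.1 ++ "."))).map (·.2)).getD 10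
      d.modify prio [] (· ++ [email])) init
  -- out = []; for p in _PRIOS: out += buckets[p]
  altPrios.foldl (fun out p => out ++ buckets.getD p []) []

-- ===== PRECONDITION & SPEC =====
def Spec_filter_emails (emails : List String) (site_domain : String) (out : List String) : Prop := out = filter_emails_alt emails site_domain
instance (emails : List String) (site_domain : String) (out : List String) : Decidable (Spec_filter_emails emails site_domain out) := by unfold Spec_filter_emails; infer_instance

-- ===== CLAIM =====
def Claim_equal_filter_emails : Prop := ∀ (emails : List String) (site_domain : String), Dom_filter_emails emails site_domain → Spec_filter_emails emails site_domain (filter_emails emails site_domain)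

-- ===== LEMMAS AND PROOFS =====

-- the common keep-predicate both loops implement
def pvKeep (email : String) : Bool :=
  let loc := pvLocal email
  !(pvBlacklist.contains loc || pvBlacklist.any (fun p => PySem.Str.startswith loc (p ++ "."))) &&
  !(pvExts.any (fun ext => PySem.Str.endswith email ext))

theorem insertBy_cons {α : Type} (b : α → α → Bool) (x y : α) (ys : List α) :
    PySem.List.insertBy b x (y :: ys) =
      if b x y then x :: y :: ys else y :: PySem.List.insertBy b x ys := rfl

theorem insertBy_append_not_before {α : Type} (b : α → α → Bool) (x : α) (l t : List α)
    (h : ∀ y ∈ l, b x y = false) :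
    PySem.List.insertBy b x (l ++ t) = l ++ PySem.List.insertBy b x t := by
  induction l with
  | nil => simp
  | cons y ys ih =>
    simp only [List.cons_append, insertBy_cons, h y (by simp),
      ih (fun z hz => h z (by simp [hz]))]
    simp

theorem insertBy_all_before {α : Type} (b : α → α → Bool) (x : α) (l : List α)
    (h : ∀ y ∈ l, b x y = true) :
    PySem.List.insertBy b x l = x :: l := by
  cases l with
  | nil => rfl
  | cons y ys => simp [insertBy_cons, h y (by simp)]

theorem flatMap_congr_mem {α β : Type} (l : List α) (f g : α → List β)
    (h : ∀ a ∈ l, f a = g a) : l.flatMap f = l.flatMap g := by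
  induction l with
  | nil => rfl
  | cons a t ih => simp [List.flatMap_cons, h a (by simp), ih (fun z hz => h z (by simp [hz]))]

-- inserting x into a concatenation of strictly-increasing-key buckets puts it at the
-- end of its own bucket
theorem insertBy_flatMap {α : Type} (key : α → Int) (x : α) :
    ∀ (ks : List Int) (g : Int → List α),
      ks.Pairwise (· < ·) → key x ∈ ks → (∀ p, ∀ a ∈ g p, key a = p) →
      PySem.List.insertBy (fun a b => decide (key a < key b)) x (ks.flatMap g) =
        ks.flatMap (fun p => g p ++ if key x == p then [x] else []) := by
  intro ks
  induction ks with
  | nil => intro g _ hx _; simp at hx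
  | cons k rest ih =>
    intro g hks hx hg
    have hrest : ∀ p ∈ rest, k < p := by
      intro p hp; exact (List.pairwise_cons.mp hks).1 p hp
    have hgk : ∀ y ∈ g k, (fun a b => decide (key a < key b)) x y = false := by
      intro y hy
      have := hg k y hy
      rcases (List.mem_cons.mp hx) with h | h
      · simp [this, h]
      · have : k < key x := hrest _ h
        simp [hg k y hy]; omega
    simp only [List.flatMap_cons]
    rw [insertBy_append_not_before _ _ _ _ hgk]
    rcases (List.mem_cons.mp hx) with h | h
    · have hall : ∀ y ∈ rest.flatMap g, (fun a b => decide (key a < key b)) x y = true := by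
        intro y hy
        rcases List.mem_flatMap.mp hy with ⟨p, hp, hyp⟩
        have := hg p y hyp
        have := hrest p hp
        simp [hg p y hyp, h]; omega
      rw [insertBy_all_before _ _ _ hall]
      have hxk : (key x == k) = true := by simp [h]
      have hrest' : rest.flatMap (fun p => g p ++ if key x == p then [x] else []) = rest.flatMap g := by
        apply flatMap_congr_mem
        intro p hp
        have : key x ≠ p := by have := hrest p hp; omega
        simp [this]
      rw [hrest']
      simp [hxk]
    · have hxk : (key x == k) = false := by
        have := hrest _ h; simp; omega
      rw [ih g (List.pairwise_cons.mp hks).2 h hg]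
      simp [hxk]

theorem pvKey_mem (e : String) : pvKey e ∈ altPrios := by
  unfold pvKey pvPriorityItems altPrios
  simp only [pvPrioLoop]
  split_ifs <;> simp

-- the stable sort by pvKey is the concatenation of the priority buckets
theorem sorted_eq_buckets (xs : List String) :
    PySem.List.sorted xs pvKey false =
      altPrios.flatMap (fun p => xs.filter (fun e => pvKey e == p)) := by
  induction xs using List.reverseRecOn with
  | nil => simp [PySem.List.sorted_eq_foldl_insertBy, altPrios]
  | append_singleton xs x ih =>
    rw [PySem.List.sorted_eq_foldl_insertBy] at *
    rw [List.foldl_append, List.foldl_cons, List.foldl_nil, ih]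
    rw [insertBy_flatMap pvKey x altPrios
        (fun p => xs.filter (fun e => pvKey e == p)) (by decide) (pvKey_mem x)
        (fun p a ha => by
          have := List.mem_filter.mp ha
          exact beq_iff_eq.mp this.2)]
    apply flatMap_congr_mem
    intro p _
    simp only [List.filter_append, List.filter_cons, List.filter_nil]

-- A's accumulating filter loop is List.filter pvKeep
theorem foldl_eq_filter (emails : List String) :
    emails.foldl (fun acc email =>
      let loc := pvLocal email
      if pvBlacklist.contains loc || pvBlacklist.any (fun p => PySem.Str.startswith loc (p ++ ".")) then
        acc
      else if pvExts.any (fun ext => PySem.Str.endswith email ext) then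
        acc
      else acc ++ [email]) [] = emails.filter pvKeep := by
  have hstep : (fun (acc : List String) email =>
      let loc := pvLocal email
      if pvBlacklist.contains loc || pvBlacklist.any (fun p => PySem.Str.startswith loc (p ++ ".")) then
        acc
      else if pvExts.any (fun ext => PySem.Str.endswith email ext) then
        acc
      else acc ++ [email]) =
      (fun acc email => if pvKeep email then acc ++ [(fun e => e) email] else acc) := by
    funext acc email
    simp only [pvKeep]
    cases hB1 : (pvBlacklist.contains (pvLocal email) || pvBlacklist.any (fun p => PySem.Str.startswith (pvLocal email) (p ++ "."))) <;>
      cases hB2 : pvExts.any (fun ext => PySem.Str.endswith email ext) <;>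
        simp
  rw [hstep, PySem.List.foldl_append_if]
  simp

-- B's inline blacklist test (one combined any) equals A's contains-or-any test
theorem contains_or_any (l : List String) (loc : String) (f : String → Bool) :
    (l.contains loc || l.any f) = l.any (fun b => loc == b || f b) := by
  induction l with
  | nil => rfl
  | cons b t ih =>
    simp only [List.any_cons, List.contains_cons, ← ih]
    by_cases h : loc = b <;> simp [h] <;>
      cases f b <;> cases t.any f <;> simp [decide_eq_true_eq] <;>
        simp [List.contains_iff_exists_mem_beq, List.any_eq_true]

-- B's find?-based priority equals A's first-match loop
theorem find_eq_prioLoop (loc : String) : ∀ (items : List (String × Int)),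
    ((items.find? (fun t => loc == t.1 || PySem.Str.startswith loc (t.1 ++ "."))).map (·.2)).getD 10 =
      pvPrioLoop items loc := by
  intro items
  induction items with
  | nil => rfl
  | cons t rest ih =>
    obtain ⟨pre, pr⟩ := t
    cases h : (loc == pre || PySem.Chars.startswith loc.toList (pre.toList ++ ['.'])) <;>
      simp only [List.find?_cons] <;> simp [pvPrioLoop, h] <;> simpa using ih

-- the bucket-building fold, read off at one priority p
theorem getD_bucket_fold (p : Int) : ∀ (l : List String) (d : PySem.Dict Int (List String)),
    (l.foldl (fun d e => if pvKeep e then d.modify (pvKey e) [] (· ++ [e]) else d) d).getD p [] =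
      d.getD p [] ++ ((l.filter pvKeep).filter (fun e => pvKey e == p)) := by
  intro l
  induction l with
  | nil => simp
  | cons e t ih =>
    intro d
    by_cases hk : pvKeep e
    · by_cases hp : pvKey e = p
      · simp [hk, hp, ih, PySem.Dict.getD_modify, List.filter_cons]
      · have hbe : (pvKey e == p) = false := by simp [hp]
        have hp' : p ≠ pvKey e := fun hh => hp hh.symm
        simp [hk, ih, PySem.Dict.getD_modify, List.filter_cons, hbe, hp']
    · simp [hk, ih, List.filter_cons]

-- the initial bucket dict maps every key to []
theorem getD_init (p : Int) :
    (PySem.Dict.ofList (altPrios.map (fun q => (q, ([] : List String))))).getD p [] = [] := by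
  simp only [altPrios, List.map]
  simp [PySem.Dict.ofList, PySem.Dict.update, PySem.Dict.getD_insert]

-- accumulating appends over a key list is flatMap
theorem foldl_append_eq_flatMap' {α : Type} (g : Int → List α) :
    ∀ (ks : List Int) (acc : List α), ks.foldl (fun out p => out ++ g p) acc = acc ++ ks.flatMap g := by
  intro ks
  induction ks with
  | nil => simp
  | cons k t ih => intro acc; simp [List.foldl_cons, ih, List.flatMap_cons]

-- B's per-email step is the keep/bucket step
theorem alt_step_eq :
    (fun (d : PySem.Dict Int (List String)) email =>
      let loc := PySem.Str.lower (((PySem.Str.split? email "@").getD []).headD "")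
      if altBlacklist.any (fun b => loc == b || PySem.Str.startswith loc (b ++ ".")) then d
      else if altExts.any (fun x => PySem.Str.endswith email x) then d
      else
        let prio := ((altPrioItems.find? (fun t =>
          loc == t.1 || PySem.Str.startswith loc (t.1 ++ "."))).map (·.2)).getD 10
        d.modify prio [] (· ++ [email])) =
    (fun d e => if pvKeep e then d.modify (pvKey e) [] (· ++ [e]) else d) := by
  funext d email
  have hbl : altBlacklist = pvBlacklist := rfl
  have hloc : PySem.Str.lower (((PySem.Str.split? email "@").getD []).headD "") = pvLocal email := rfl
  simp only [hbl, hloc]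
  rw [← contains_or_any pvBlacklist (pvLocal email)
        (fun b => PySem.Str.startswith (pvLocal email) (b ++ "."))]
  rw [find_eq_prioLoop (pvLocal email) altPrioItems]
  have hitems : altPrioItems = pvPriorityItems := rfl
  have hex : altExts = pvExts := rfl
  rw [hitems]
  simp only [pvKeep, pvKey, hex]
  cases hB1 : (pvBlacklist.contains (pvLocal email) ||
      pvBlacklist.any (fun p => PySem.Str.startswith (pvLocal email) (p ++ "."))) <;>
    cases hB2 : pvExts.any (fun ext => PySem.Str.endswith email ext) <;> simp [hB1, hB2]

-- ===== VERDICT =====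
theorem filter_emails_spec : Claim_equal_filter_emails := by
  intro emails site_domain _
  unfold Spec_filter_emails filter_emails filter_emails_alt
  simp only [foldl_eq_filter, sorted_eq_buckets, alt_step_eq,
    foldl_append_eq_flatMap' (fun p => _)]
  rw [List.nil_append]
  apply flatMap_congr_mem
  intro p _
  rw [getD_bucket_fold, getD_init, List.nil_append]
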